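-- pv_equiv track=rewrite | github.com/BooMBoTTess/Trainings_repo | 40yand/razm/razm4.py | Solution
-- ===== SOURCE A (Python) =====
-- def Solution(students):
--     k = len(students) - 2
--     nk = k
--     p = [sum(students[1:]) - (students[0] * (len(students) - 1))]
--     index = 1
--     while k != 0 and k != -1:
--         p.append(p[index - 1] - (students[index] - students[index - 1]) * k)
--
--         index += 1
--         k -= 2
--     if len(students) % 2 == 0:
--         p.append(p[-1])
--         index += 1
--         k = 2
--     else:
--         k = 1
--     while k <= nk:
--         p.append(p[index - 1] + (students[index] - students[index - 1]) * k)
--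
--         index += 1
--         k += 2
--
--
--     return p
-- ===== SOURCE B (Python) =====
-- def Solution(students):
--     n = len(students)
--     S = sum(students)
--     res = []
--     P = 0
--     for i, v in enumerate(students):
--         res.append((2 * i - n) * v - 2 * P + S)
--         P += v
--     return res
-- ===== Notes on version B (the rewrite author's own statement) =====
-- stated objective: simpler
-- what changed: Replaces A's incremental recurrence with two sign-phase while loops and an even/odd branch by a single forward pass computing each entry from a closed form over a running prefix sum.
-- crash fix: A raises IndexError on the empty list (students[0] in the seed expression); B naturally returns []. — e.g. on Solution([]): A raises IndexError, B returns []
import Mathlib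
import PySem

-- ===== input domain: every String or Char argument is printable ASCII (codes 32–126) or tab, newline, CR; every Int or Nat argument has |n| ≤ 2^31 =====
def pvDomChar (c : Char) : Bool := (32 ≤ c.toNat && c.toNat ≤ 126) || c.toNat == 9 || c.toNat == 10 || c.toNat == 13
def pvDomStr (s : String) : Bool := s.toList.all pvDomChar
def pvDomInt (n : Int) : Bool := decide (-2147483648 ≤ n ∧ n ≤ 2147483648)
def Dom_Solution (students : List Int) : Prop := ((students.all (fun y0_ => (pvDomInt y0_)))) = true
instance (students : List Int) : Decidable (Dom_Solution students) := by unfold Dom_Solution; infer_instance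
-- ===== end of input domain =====

-- B replaces A's incremental recurrence (two sign-phase while loops plus an even/odd
-- branch) with a single forward pass computing each entry from a closed form over a
-- running prefix sum.

-- ===== PORT A =====
-- first while loop: while k != 0 and k != -1 (fuel = len(students) suffices: the loop
-- runs at most (len-1)//2 times; fuel only makes the recursion total)
def pvLoop1 (students : List Int) (p : List Int) (index k : Int) : Nat → List Int × Int
  | 0 => (p, index)
  | fuel + 1 =>
    if k ≠ 0 ∧ k ≠ -1 then
      pvLoop1 students
        (p ++ [PySem.List.pyGetD p (index - 1) 0 -
               (PySem.List.pyGetD students index 0 - PySem.List.pyGetD students (index - 1) 0) * k])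
        (index + 1) (k - 2) fuel
    else (p, index)

-- second while loop: while k <= nk
def pvLoop2 (students : List Int) (nk : Int) (p : List Int) (index k : Int) : Nat → List Int
  | 0 => p
  | fuel + 1 =>
    if k ≤ nk then
      pvLoop2 students nk
        (p ++ [PySem.List.pyGetD p (index - 1) 0 +
               (PySem.List.pyGetD students index 0 - PySem.List.pyGetD students (index - 1) 0) * k])
        (index + 1) (k + 2) fuel
    else p

def Solution (students : List Int) : List Int :=
  let n := students.length
  let nk : Int := (n : Int) - 2
  let r := pvLoop1 students
      [(PySem.List.slice students (some 1) none).sum -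
        PySem.List.pyGetD students 0 0 * ((n : Int) - 1)]
      1 ((n : Int) - 2) n
  if n % 2 == 0 then
    pvLoop2 students nk (r.1 ++ [PySem.List.pyGetD r.1 (-1) 0]) (r.2 + 1) 2 n
  else
    pvLoop2 students nk r.1 r.2 1 n

-- ===== PORT B =====
def Solution_alt (students : List Int) : List Int :=
  let n : Int := students.length
  let S : Int := students.sum
  ((PySem.List.enumerate students 0).foldl
    (fun st iv => (st.1 ++ [(2 * iv.1 - n) * iv.2 - 2 * st.2 + S], st.2 + iv.2))
    ([], 0)).1

-- ===== PRECONDITION & SPEC =====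
-- Pre_ excludes exactly the empty list, on which Python A raises IndexError (students[0]).
def Pre_Solution (students : List Int) : Prop := students ≠ []
instance (students : List Int) : Decidable (Pre_Solution students) := by unfold Pre_Solution; infer_instance
def pvWitness_Solution : List Int := [3, 1, 4, 1, 5]

-- A raises IndexError on the empty list (students[0] in the seed expression); B naturally returns [].
def Raises_Solution (students : List Int) : Prop := students = []
instance (students : List Int) : Decidable (Raises_Solution students) := by unfold Raises_Solution; infer_instance
def pvRaiseWitness_Solution : List Int := []
def pvRaiseWitnessOut_Solution : List Int := []

def Spec_Solution (students : List Int) (out : List Int) : Prop := out = Solution_alt students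
instance (students : List Int) (out : List Int) : Decidable (Spec_Solution students out) := by unfold Spec_Solution; infer_instance

-- ===== CLAIM (what is proved, stated in full; the proofs are below) =====
def Claim_equal_Solution : Prop := ∀ (students : List Int), Dom_Solution students → Pre_Solution students → Spec_Solution students (Solution students)
def Claim_raises_Solution : Prop := (∀ (students : List Int), Dom_Solution students → Raises_Solution students → ¬ Pre_Solution students) ∧ (Dom_Solution (pvRaiseWitness_Solution) ∧ Raises_Solution (pvRaiseWitness_Solution) ∧ Solution_alt (pvRaiseWitness_Solution) = pvRaiseWitnessOut_Solution)

-- ===== LEMMAS AND PROOFS =====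

-- the common closed form: entry i of the result
def pvF (s : List Int) (i : Nat) : Int :=
  (2 * (i : Int) - s.length) * s.getD i 0 - 2 * (s.take i).sum + s.sum

lemma pv_take_succ_sum (s : List Int) (i : Nat) :
    (s.take (i + 1)).sum = (s.take i).sum + s.getD i 0 := by
  rw [List.take_succ, List.sum_append, List.getD_eq_getElem?_getD]
  cases h : s[i]? <;> simp [h]

lemma pvF_step (s : List Int) (i : Nat) :
    pvF s (i + 1) = pvF s i + (2 * ((i : Int) + 1) - s.length) * (s.getD (i + 1) 0 - s.getD i 0) := by
  unfold pvF
  rw [pv_take_succ_sum]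
  push_cast
  ring

lemma pv_getD_map_range (f : Nat → Int) (i j : Nat) (h : j < i) :
    ((List.range i).map f).getD j 0 = f j := by
  rw [List.getD_eq_getElem?_getD]
  simp [List.getElem?_map, List.getElem?_range, h]

lemma pvLoop1_inv (s : List Int) : ∀ (fuel i : Nat), 1 ≤ i → i ≤ (s.length + 1) / 2 →
    (s.length + 1) / 2 ≤ i + fuel →
    pvLoop1 s ((List.range i).map (pvF s)) (i : Int) ((s.length : Int) - 2 * i) fuel
      = (((List.range ((s.length + 1) / 2)).map (pvF s)), (((s.length + 1) / 2 : Nat) : Int)) := by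
  intro fuel
  induction fuel with
  | zero =>
    intro i h1 h2 h3
    have : i = (s.length + 1) / 2 := by omega
    subst this
    simp [pvLoop1]
  | succ fuel ih =>
    intro i h1 h2 h3
    by_cases hi : i = (s.length + 1) / 2
    · subst hi
      simp only [pvLoop1]
      rw [if_neg (by omega)]
    · have hlt : i < (s.length + 1) / 2 := by omega
      simp only [pvLoop1]
      rw [if_pos (by omega)]
      rw [show ((i : Int) - 1) = ((i - 1 : Nat) : Int) from by omega]
      simp only [PySem.List.pyGetD_natCast]
      rw [pv_getD_map_range (pvF s) i (i - 1) (by omega)]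
      have hstep := pvF_step s (i - 1)
      rw [Nat.sub_add_cancel h1] at hstep
      have hval : pvF s (i - 1) -
          (s.getD i 0 - s.getD (i - 1) 0) * ((s.length : Int) - 2 * i) = pvF s i := by
        rw [hstep, Nat.cast_sub h1]
        push_cast
        ring
      rw [hval]
      rw [show (List.range i).map (pvF s) ++ [pvF s i] = (List.range (i + 1)).map (pvF s) from by
        rw [List.range_succ, List.map_append, List.map_singleton]]
      rw [show ((i : Int) + 1) = ((i + 1 : Nat) : Int) from by push_cast; ring]
      rw [show ((s.length : Int) - 2 * i - 2) = (s.length : Int) - 2 * ((i + 1 : Nat) : Int) from by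
        push_cast; ring]
      exact ih (i + 1) (by omega) (by omega) (by omega)

lemma pvLoop2_inv (s : List Int) : ∀ (fuel i : Nat), 1 ≤ i → i ≤ s.length →
    s.length ≤ i + fuel →
    pvLoop2 s ((s.length : Int) - 2) ((List.range i).map (pvF s)) (i : Int) (2 * (i : Int) - s.length) fuel
      = (List.range s.length).map (pvF s) := by
  intro fuel
  induction fuel with
  | zero =>
    intro i h1 h2 h3
    have : i = s.length := by omega
    subst this
    simp [pvLoop2]
  | succ fuel ih =>
    intro i h1 h2 h3
    by_cases hi : i = s.length
    · subst hi
      simp only [pvLoop2]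
      rw [if_neg (by omega)]
    · have hlt : i < s.length := by omega
      simp only [pvLoop2]
      rw [if_pos (by omega)]
      rw [show ((i : Int) - 1) = ((i - 1 : Nat) : Int) from by omega]
      simp only [PySem.List.pyGetD_natCast]
      rw [pv_getD_map_range (pvF s) i (i - 1) (by omega)]
      have hstep := pvF_step s (i - 1)
      rw [Nat.sub_add_cancel h1] at hstep
      have hval : pvF s (i - 1) +
          (s.getD i 0 - s.getD (i - 1) 0) * (2 * (i : Int) - s.length) = pvF s i := by
        rw [hstep, Nat.cast_sub h1]
        push_cast
        ring
      rw [hval]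
      rw [show (List.range i).map (pvF s) ++ [pvF s i] = (List.range (i + 1)).map (pvF s) from by
        rw [List.range_succ, List.map_append, List.map_singleton]]
      rw [show ((i : Int) + 1) = ((i + 1 : Nat) : Int) from by push_cast; ring]
      rw [show (2 * (i : Int) - s.length + 2) = 2 * ((i + 1 : Nat) : Int) - s.length from by
        push_cast; ring]
      exact ih (i + 1) (by omega) (by omega) (by omega)

lemma pvA_closed (s : List Int) (hs : s ≠ []) :
    Solution s = (List.range s.length).map (pvF s) := by
  cases s with
  | nil => exact absurd rfl hs
  | cons a t =>
    have hr := pvLoop1_inv (a :: t) (a :: t).length 1 (le_refl 1)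
      (by simp; omega) (by simp; omega)
    simp only [Nat.cast_one, mul_one] at hr
    have hseed : [(PySem.List.slice (a :: t) (some 1) none).sum -
        PySem.List.pyGetD (a :: t) 0 0 * (((a :: t).length : Int) - 1)] =
        List.map (pvF (a :: t)) (List.range 1) := by
      rw [PySem.List.slice_from_one]
      simp [pvF]
      ring
    simp only [Solution]
    rw [hseed, hr]
    dsimp only
    by_cases hp : (a :: t).length % 2 = 0
    · rw [if_pos (by simpa using hp)]
      obtain ⟨j, hj⟩ : ∃ j, ((a :: t).length + 1) / 2 = j + 1 := ⟨((a :: t).length + 1) / 2 - 1, by simp; omega⟩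
      have hn : (a :: t).length = 2 * j + 2 := by omega
      have hFj : pvF (a :: t) (j + 1) = pvF (a :: t) j := by
        rw [pvF_step]
        rw [show (2 * ((j : Int) + 1) - ((a :: t).length : Int)) = 0 from by push_cast [hn]; ring]
        ring
      rw [hj, List.range_succ, List.map_append, List.map_singleton,
        PySem.List.pyGetD_neg_one_append_singleton]
      have hass : (List.map (pvF (a :: t)) (List.range j) ++ [pvF (a :: t) j]) ++ [pvF (a :: t) j]
          = List.map (pvF (a :: t)) (List.range (j + 2)) := by
        rw [show j + 2 = (j + 1) + 1 from rfl, List.range_succ, List.map_append, List.map_singleton,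
          List.range_succ, List.map_append, List.map_singleton, hFj]
      rw [hass]
      have h2 := pvLoop2_inv (a :: t) (a :: t).length (j + 2) (by omega) (by omega) (by omega)
      rw [show (2 * ((j + 2 : Nat) : Int) - ((a :: t).length : Int)) = 2 from by
        push_cast [hn]; ring] at h2
      rw [show (((j + 1 : Nat) : Int) + 1) = ((j + 2 : Nat) : Int) from by push_cast; ring]
      exact h2
    · rw [if_neg (by simpa using hp)]
      have hodd : (a :: t).length = 2 * (((a :: t).length + 1) / 2) - 1 := by
        have : 1 ≤ (a :: t).length := by simp
        omega
      have h2 := pvLoop2_inv (a :: t) (a :: t).length (((a :: t).length + 1) / 2)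
        (by omega) (by omega) (by omega)
      rw [show (2 * (((((a :: t).length + 1) / 2 : Nat)) : Int) - ((a :: t).length : Int)) = 1 from by
        have h1 : 1 ≤ (a :: t).length := by simp
        omega] at h2
      exact h2

lemma pvB_loop (s : List Int) : ∀ (t : List Int) (j : Nat) (acc : List Int), s.drop j = t →
    ((PySem.List.enumerate t (j : Int)).foldl
      (fun st iv => (st.1 ++ [(2 * iv.1 - (s.length : Int)) * iv.2 - 2 * st.2 + s.sum], st.2 + iv.2))
      (acc, (s.take j).sum)).1
    = acc ++ (List.range' j t.length).map (pvF s) := by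
  intro t
  induction t with
  | nil => intro j acc _; simp [PySem.List.enumerate_nil]
  | cons v t ih =>
    intro j acc hdrop
    have hj : s[j]? = some v := by
      have h0 := congrArg (fun l : List Int => l[0]?) hdrop
      simp only [List.getElem?_drop] at h0
      simpa using h0
    have hgetD : s.getD j 0 = v := by rw [List.getD_eq_getElem?_getD, hj]; rfl
    have hdrop' : s.drop (j + 1) = t := by
      have : (s.drop j).drop 1 = s.drop (j + 1) := by rw [List.drop_drop]
      rw [← this, hdrop]
      simp
    rw [PySem.List.enumerate_cons, List.foldl_cons]
    have hval : (2 * (j : Int) - (s.length : Int)) * v - 2 * (s.take j).sum + s.sum = pvF s j := by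
      rw [pvF, hgetD]
    simp only [hval]
    rw [show ((s.take j).sum + v) = (s.take (j + 1)).sum from by rw [pv_take_succ_sum, hgetD]]
    rw [show ((j : Int) + 1) = ((j + 1 : Nat) : Int) from by push_cast; ring]
    rw [ih (j + 1) (acc ++ [pvF s j]) hdrop']
    rw [List.length_cons, List.range'_succ, List.map_cons, List.append_assoc]
    simp

lemma pvB_closed (s : List Int) :
    Solution_alt s = (List.range s.length).map (pvF s) := by
  simp only [Solution_alt]
  exact (pvB_loop s s 0 [] (by simp)).trans (by simp [List.range_eq_range'])

-- ===== VERDICT (by name: the statement is the Claim_ definition above) =====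
theorem Solution_spec : Claim_equal_Solution := by
  intro s _ hpre
  show Solution s = Solution_alt s
  rw [pvA_closed s hpre, pvB_closed]

@[simp] theorem Solution_raises : Claim_raises_Solution := by
  unfold Claim_raises_Solution
  exact ⟨fun s _ h hp => hp h, by decide⟩
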